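-- pv_equiv track=rewrite | github.com/MickLC/docassemble-privacy-doc-generator | docassemble/privacydocgenerator/gdpr_module.py | requires_dpia
-- ===== SOURCE A (Python) =====
-- def requires_dpia(data_types_collected, processing_purposes):
--     """
--     Determines whether a Data Protection Impact Assessment (DPIA)
--     is likely required based on data types and purposes.
--     Returns True if high-risk processing is detected.
--     """
--     high_risk_data = [
--         'Health or medical data',
--         "Children's data (under 16)",
--         'Financial information',
--         'Location data',
--     ]
--     high_risk_purposes = [
--         'Analytics and service improvement',
--         'Fraud prevention and security',
--     ]
--
--     for item in high_risk_data:
--         if data_types_collected.get(item):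
--             return True
--     for purpose in high_risk_purposes:
--         if processing_purposes.get(purpose):
--             return True
--     return False
-- ===== SOURCE B (Python) =====
-- def requires_dpia(data_types_collected, processing_purposes):
--     """
--     Determines whether a Data Protection Impact Assessment (DPIA)
--     is likely required based on data types and purposes.
--     Returns True if high-risk processing is detected.
--     """
--     high_risk_data = {
--         'Health or medical data',
--         "Children's data (under 16)",
--         'Financial information',
--         'Location data',
--     }
--     high_risk_purposes = {
--         'Analytics and service improvement',
--         'Fraud prevention and security',
--     }
--     truthy_data = {k for k, v in data_types_collected.items() if v}
--     truthy_purposes = {k for k, v in processing_purposes.items() if v}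
--     return bool((truthy_data & high_risk_data) or (truthy_purposes & high_risk_purposes))
-- ===== Notes on version B (the rewrite author's own statement) =====
-- stated objective: alternative
-- what changed: Instead of looking up each fixed high-risk key in the dicts with two short-circuiting loops, B makes one pass over each dict collecting the set of truthy keys and tests set intersection with the high-risk key sets.
import Mathlib
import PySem

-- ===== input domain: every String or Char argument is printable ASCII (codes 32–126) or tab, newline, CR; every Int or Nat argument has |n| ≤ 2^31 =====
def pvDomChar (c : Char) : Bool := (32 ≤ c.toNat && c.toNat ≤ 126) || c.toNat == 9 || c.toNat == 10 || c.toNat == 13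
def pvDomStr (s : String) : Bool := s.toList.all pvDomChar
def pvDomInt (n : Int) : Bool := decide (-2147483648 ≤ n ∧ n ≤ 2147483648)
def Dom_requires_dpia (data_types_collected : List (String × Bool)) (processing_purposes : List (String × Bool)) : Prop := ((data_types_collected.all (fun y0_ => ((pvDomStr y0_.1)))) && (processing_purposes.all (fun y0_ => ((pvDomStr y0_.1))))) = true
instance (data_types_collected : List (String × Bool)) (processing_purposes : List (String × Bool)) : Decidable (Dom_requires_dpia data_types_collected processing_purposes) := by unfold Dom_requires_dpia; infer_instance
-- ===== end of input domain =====

-- B replaces A's per-key dict lookups by one pass collecting truthy keys and set intersection (alternative decomposition, same cost in practice).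

-- ===== PORT A =====
def pvHighRiskData : List String :=
  ["Health or medical data", "Children's data (under 16)", "Financial information", "Location data"]

def pvHighRiskPurposes : List String :=
  ["Analytics and service improvement", "Fraud prevention and security"]

-- A: two short-circuiting loops over the fixed key lists, looking each key up with dict.get
def requires_dpia (data_types_collected : List (String × Bool)) (processing_purposes : List (String × Bool)) : Bool :=
  if pvHighRiskData.any (fun item => ((PySem.Dict.mk data_types_collected).get? item).getD false) then
    true
  else if pvHighRiskPurposes.any (fun purpose => ((PySem.Dict.mk processing_purposes).get? purpose).getD false) then
    true
  else
    false

-- ===== PORT B =====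
def pvHighRiskDataSet : PySem.Set String := PySem.Set.ofList pvHighRiskData
def pvHighRiskPurposesSet : PySem.Set String := PySem.Set.ofList pvHighRiskPurposes

-- B: collect the set of truthy keys of each dict, then test intersection with the high-risk sets
def requires_dpia_alt (data_types_collected : List (String × Bool)) (processing_purposes : List (String × Bool)) : Bool :=
  let truthy_data : PySem.Set String :=
    PySem.Set.ofList ((data_types_collected.filter (fun kv => kv.2)).map Prod.fst)
  let truthy_purposes : PySem.Set String :=
    PySem.Set.ofList ((processing_purposes.filter (fun kv => kv.2)).map Prod.fst)
  !(PySem.Set.inter truthy_data pvHighRiskDataSet).isEmpty ||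
    !(PySem.Set.inter truthy_purposes pvHighRiskPurposesSet).isEmpty

-- ===== PRECONDITION & SPEC =====
-- The assoc lists stand for Python dicts, whose keys are unique; Pre_ states that invariant
-- (it excludes no Python input: a Python dict cannot carry duplicate keys).
def Pre_requires_dpia (data_types_collected : List (String × Bool)) (processing_purposes : List (String × Bool)) : Prop :=
  (data_types_collected.map Prod.fst).Nodup ∧ (processing_purposes.map Prod.fst).Nodup

instance (data_types_collected : List (String × Bool)) (processing_purposes : List (String × Bool)) : Decidable (Pre_requires_dpia data_types_collected processing_purposes) := by unfold Pre_requires_dpia; infer_instance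

def pvWitness_requires_dpia : (List (String × Bool)) × (List (String × Bool)) :=
  ([("Health or medical data", true), ("other", false)], [("Fraud prevention and security", false)])

def Spec_requires_dpia (data_types_collected : List (String × Bool)) (processing_purposes : List (String × Bool)) (out : Bool) : Prop := out = requires_dpia_alt data_types_collected processing_purposes
instance (data_types_collected : List (String × Bool)) (processing_purposes : List (String × Bool)) (out : Bool) : Decidable (Spec_requires_dpia data_types_collected processing_purposes out) := by unfold Spec_requires_dpia; infer_instance

-- ===== CLAIM (what is proved, stated in full; the proofs are below) =====
def Claim_equal_requires_dpia : Prop := ∀ (data_types_collected : List (String × Bool)) (processing_purposes : List (String × Bool)), Dom_requires_dpia data_types_collected processing_purposes → Pre_requires_dpia data_types_collected processing_purposes → Spec_requires_dpia data_types_collected processing_purposes (requires_dpia data_types_collected processing_purposes)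

-- ===== LEMMAS AND PROOFS =====

-- With unique keys, dict.get k is truthy iff some truthy pair with key k is in the list.
lemma pvGetD_mk_eq_any (d : List (String × Bool)) (h : (d.map Prod.fst).Nodup) (k : String) :
    ((PySem.Dict.mk d).get? k).getD false = d.any (fun kv => kv.1 == k && kv.2) := by
  induction d with
  | nil => simp [PySem.Dict.get?]
  | cons a rest ih =>
    simp only [List.map_cons, List.nodup_cons] at h
    rw [PySem.Dict.get?_mk_cons]
    by_cases hk : (a.1 == k) = true
    · have hk' : a.1 = k := by simpa using hk
      have hrest : rest.any (fun kv => kv.1 == k && kv.2) = false := by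
        simp only [List.any_eq_false]
        intro kv hkv
        have hne : kv.1 ≠ k := by
          intro e; exact h.1 (by rw [hk', ← e]; exact List.mem_map_of_mem hkv)
        simp [hne]
      simp [hk, hrest]
    · have hkf : (a.1 == k) = false := by simpa using hk
      rw [if_neg hk, ih h.2]
      simp [hkf]

-- A's loop over the high-risk keys equals B's intersection test, for one dict.
lemma pvHit_eq (hr : List String) (d : List (String × Bool)) (h : (d.map Prod.fst).Nodup) :
    hr.any (fun k => ((PySem.Dict.mk d).get? k).getD false)
      = !(PySem.Set.inter (PySem.Set.ofList ((d.filter (fun kv => kv.2)).map Prod.fst)) (PySem.Set.ofList hr)).isEmpty := by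
  rw [Bool.eq_iff_iff]
  constructor
  · intro hl
    simp only [List.any_eq_true] at hl
    obtain ⟨k, hkhr, hget⟩ := hl
    rw [pvGetD_mk_eq_any d h k] at hget
    simp only [List.any_eq_true, Bool.and_eq_true, beq_iff_eq] at hget
    obtain ⟨kv, hkv, hke, hv⟩ := hget
    have hmem : k ∈ PySem.Set.inter (PySem.Set.ofList ((d.filter (fun kv => kv.2)).map Prod.fst)) (PySem.Set.ofList hr) := by
      rw [PySem.Set.mem_inter, PySem.Set.mem_ofList, PySem.Set.mem_ofList]
      refine ⟨List.mem_map.mpr ⟨kv, List.mem_filter.mpr ⟨hkv, hv⟩, hke⟩, hkhr⟩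
    simp only [Bool.not_eq_true', List.isEmpty_eq_false_iff_exists_mem]
    exact ⟨k, hmem⟩
  · intro hr'
    simp only [Bool.not_eq_true', List.isEmpty_eq_false_iff_exists_mem] at hr'
    obtain ⟨k, hk⟩ := hr'
    rw [PySem.Set.mem_inter, PySem.Set.mem_ofList, PySem.Set.mem_ofList] at hk
    obtain ⟨hkt, hkhr⟩ := hk
    obtain ⟨kv, hkvf, hke⟩ := List.mem_map.mp hkt
    obtain ⟨hkv, hv⟩ := List.mem_filter.mp hkvf
    simp only [List.any_eq_true]
    refine ⟨k, hkhr, ?_⟩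
    rw [pvGetD_mk_eq_any d h k]
    simp only [List.any_eq_true, Bool.and_eq_true, beq_iff_eq]
    exact ⟨kv, hkv, hke, hv⟩

-- ===== VERDICT (by name: the statement is the Claim_ definition above) =====
theorem requires_dpia_spec : Claim_equal_requires_dpia := by
  intro d p _ hpre
  unfold Spec_requires_dpia requires_dpia requires_dpia_alt
  rw [pvHit_eq pvHighRiskData d hpre.1, pvHit_eq pvHighRiskPurposes p hpre.2]
  simp only [pvHighRiskDataSet, pvHighRiskPurposesSet]
  by_cases h1 : (PySem.Set.inter (PySem.Set.ofList ((d.filter (fun kv => kv.2)).map Prod.fst)) (PySem.Set.ofList pvHighRiskData)).isEmpty <;>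
    by_cases h2 : (PySem.Set.inter (PySem.Set.ofList ((p.filter (fun kv => kv.2)).map Prod.fst)) (PySem.Set.ofList pvHighRiskPurposes)).isEmpty <;>
    simp [h1, h2]
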